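-- pv_equiv track=rewrite | github.com/n1k0ver3E/19T3_COMP9021_UNSW | Quiz1/quiz_1.py | return_one_to_one
-- ===== SOURCE A (Python) =====
-- mapping = {}
--
-- def return_one_to_one(mapping):
--     temp = []
--     mapping_list = list(mapping.items())
--     values_list = list(mapping.values())
--     for i in range(0,len(values_list)):
--         if (values_list.count(values_list[i])) != 1:
--             temp.append(i)
--     for index in sorted(temp, reverse = True):
--         del mapping_list[index]
--
--     return dict(mapping_list)
-- ===== SOURCE B (Python) =====
-- def return_one_to_one(mapping):
--     groups = {}
--     for key, value in mapping.items():
--         groups.setdefault(value, []).append(key)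
--     return {keys[0]: value for value, keys in groups.items() if len(keys) == 1}
-- ===== Notes on version B (the rewrite author's own statement) =====
-- stated objective: faster
-- what changed: Replaces A's per-index values.count scan plus reverse-sorted index deletion and final dict() rebuild with a single pass that inverts the mapping into value -> list-of-keys groups and emits the singleton groups.
import Mathlib
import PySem

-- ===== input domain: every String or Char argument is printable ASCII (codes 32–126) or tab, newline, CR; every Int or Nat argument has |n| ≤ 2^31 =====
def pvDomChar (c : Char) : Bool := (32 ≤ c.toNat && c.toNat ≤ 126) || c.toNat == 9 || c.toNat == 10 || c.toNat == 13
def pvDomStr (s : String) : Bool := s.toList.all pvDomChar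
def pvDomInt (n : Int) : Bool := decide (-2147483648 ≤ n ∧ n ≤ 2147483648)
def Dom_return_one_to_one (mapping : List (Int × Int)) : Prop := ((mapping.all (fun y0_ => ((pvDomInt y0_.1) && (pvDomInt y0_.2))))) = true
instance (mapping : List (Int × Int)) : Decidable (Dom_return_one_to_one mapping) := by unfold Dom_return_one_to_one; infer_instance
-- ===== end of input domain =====

-- B inverts the mapping once into value → list-of-keys groups and emits the singleton groups,
-- instead of A's count-per-index scan followed by reverse-sorted index deletion (objective: simpler).

-- ===== PORT A =====
def return_one_to_one (mapping : List (Int × Int)) : List (Int × Int) :=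
  let mapping_list := mapping
  let values_list := mapping.map (fun p => p.2)
  let temp : List Int :=
    (PySem.List.pyRange 0 (values_list.length : Int) 1).foldl
      (fun temp i =>
        if PySem.List.count values_list (PySem.List.pyGetD values_list i 0) ≠ 1
        then temp ++ [i] else temp) []
  let mapping_list2 :=
    (PySem.List.sorted temp (fun x => x) true).foldl
      (fun ml index =>
        -- 'del mapping_list[index]'; the none branch (IndexError) is unreachable: every index comes from range(len)
        match PySem.List.pop? ml index with
        | some r => r.2
        | none => ml) mapping_list
  (PySem.Dict.ofList mapping_list2).items

-- ===== PORT B =====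
def return_one_to_one_alt (mapping : List (Int × Int)) : List (Int × Int) :=
  let groups : PySem.Dict Int (List Int) :=
    mapping.foldl (fun g p => g.modify p.2 [] (fun ks => ks ++ [p.1])) PySem.Dict.empty
  (groups.items.foldl
    (fun out p =>
      if p.2.length = 1 then out.insert (PySem.List.pyGetD p.2 0 0) p.1 else out)
    PySem.Dict.empty).items

-- ===== PRECONDITION & SPEC =====
def Spec_return_one_to_one (mapping : List (Int × Int)) (out : List (Int × Int)) : Prop := out = return_one_to_one_alt mapping
instance (mapping : List (Int × Int)) (out : List (Int × Int)) : Decidable (Spec_return_one_to_one mapping out) := by unfold Spec_return_one_to_one; infer_instance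

-- ===== CLAIM (what is proved, stated in full; the proofs are below) =====
def Claim_equal_return_one_to_one : Prop := ∀ (mapping : List (Int × Int)), Dom_return_one_to_one mapping → Spec_return_one_to_one mapping (return_one_to_one mapping)

-- ===== LEMMAS AND PROOFS =====

theorem pv_del_aux (ds : List Int) :
    ∀ (t : List (Int × Int)) (a : Int × Int),
    ds.Pairwise (fun x y => y < x) →
    (∀ i ∈ ds, 0 ≤ i ∧ i < (t.length : Int)) →
    ds.foldl (fun ml index =>
        match PySem.List.pop? ml index with
        | some r => r.2
        | none => ml) (t ++ [a])
    = (ds.foldl (fun ml index =>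
        match PySem.List.pop? ml index with
        | some r => r.2
        | none => ml) t) ++ [a] := by
  induction ds with
  | nil => intro t a _ _; rfl
  | cons i ds ih =>
    intro t a hp hb
    have hb0 := hb i List.mem_cons_self
    obtain ⟨k, rfl⟩ : ∃ k : Nat, i = (k : Int) := ⟨i.toNat, (Int.toNat_of_nonneg hb0.1).symm⟩
    have hk : k < t.length := by exact_mod_cast hb0.2
    have hk' : k < (t ++ [a]).length := by simp; omega
    have h1 := PySem.List.pop?_natCast (t ++ [a]) k hk'
    have h2 := PySem.List.pop?_natCast t k hk
    simp only [List.foldl_cons, h1, h2]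
    rw [List.eraseIdx_append_of_lt_length hk [a]]
    refine ih (t.eraseIdx k) a hp.tail ?_
    intro j hj
    have hji : j < (k : Int) := List.rel_of_pairwise_cons hp hj
    have h0j : 0 ≤ j := (hb j (List.mem_cons_of_mem _ hj)).1
    have hlen : (t.eraseIdx k).length = t.length - 1 := by
      rw [List.length_eraseIdx_of_lt hk]
    refine ⟨h0j, ?_⟩
    rw [hlen]
    have h1t : 1 ≤ t.length := by omega
    push_cast [Nat.cast_sub h1t]
    omega

theorem pv_del_foldl (Q : Int × Int → Bool) (l : List (Int × Int)) :
    ((((List.range l.length).filter (fun k => !(Q (l.getD k ((0 : Int), (0 : Int)))))).map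
        (Nat.cast : Nat → Int)).reverse).foldl
      (fun ml index =>
        match PySem.List.pop? ml index with
        | some r => r.2
        | none => ml) l
    = l.filter Q := by
  induction l using List.reverseRecOn with
  | nil => rfl
  | append_singleton t a ih =>
    have hlen : (t ++ [a]).length = t.length + 1 := by simp
    rw [hlen, List.range_succ, List.filter_append, List.map_append, List.reverse_append]
    have hcong : (List.range t.length).filter
          (fun k => !(Q ((t ++ [a]).getD k ((0 : Int), (0 : Int)))))
        = (List.range t.length).filter (fun k => !(Q (t.getD k ((0 : Int), (0 : Int))))) := by
      refine List.filter_congr ?_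
      intro k hk
      rw [List.getD_append _ _ _ _ (List.mem_range.mp hk)]
    have hgetDlast : (t ++ [a]).getD t.length ((0 : Int), (0 : Int)) = a := by
      rw [List.getD_append_right _ _ _ _ (le_refl t.length)]
      simp
    have hpair : (((List.range t.length).filter
          (fun k => !(Q (t.getD k ((0 : Int), (0 : Int)))))).map
          (Nat.cast : Nat → Int)).reverse.Pairwise (fun x y => y < x) := by
      rw [List.pairwise_reverse]
      have hr : ((List.range t.length).filter
          (fun k => !(Q (t.getD k ((0 : Int), (0 : Int)))))).Pairwise (fun a b : Nat => a < b) :=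
        List.Pairwise.sublist List.filter_sublist List.pairwise_lt_range
      exact hr.map _ (fun a b (h : a < b) => by exact_mod_cast h)
    have hbnd : ∀ i ∈ (((List.range t.length).filter
          (fun k => !(Q (t.getD k ((0 : Int), (0 : Int)))))).map
          (Nat.cast : Nat → Int)).reverse, 0 ≤ i ∧ i < (t.length : Int) := by
      intro i hi
      rw [List.mem_reverse, List.mem_map] at hi
      obtain ⟨k, hk, rfl⟩ := hi
      have := List.mem_range.mp (List.mem_of_mem_filter hk)
      constructor
      · exact Int.natCast_nonneg k
      · exact_mod_cast this
    by_cases hQ : Q a = true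
    · have hfa : List.filter (fun k => !(Q ((t ++ [a]).getD k ((0 : Int), (0 : Int))))) [t.length] = [] := by
        simp [hQ]
      rw [hcong, hfa]
      simp only [List.map_nil, List.reverse_nil, List.nil_append]
      rw [pv_del_aux _ t a hpair hbnd, ih]
      rw [List.filter_append]
      simp [hQ]
    · have hQ' : Q a = false := by simpa using hQ
      have hfa : List.filter (fun k => !(Q ((t ++ [a]).getD k ((0 : Int), (0 : Int))))) [t.length] = [t.length] := by
        simp [hQ']
      rw [hcong, hfa]
      simp only [List.map_cons, List.map_nil, List.reverse_cons, List.reverse_nil, List.nil_append,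
        List.singleton_append, List.foldl_cons]
      have hk' : t.length < (t ++ [a]).length := by simp
      have h1 := PySem.List.pop?_natCast (t ++ [a]) t.length hk'
      simp only [h1]
      rw [List.eraseIdx_append_of_length_le (le_refl t.length)]
      simp only [Nat.sub_self, List.eraseIdx_cons_zero, List.append_nil]
      rw [ih, List.filter_append]
      simp [hQ']

theorem pv_foldl_append_ite (p : Int → Prop) [DecidablePred p] (l : List Int) (acc : List Int) :
    l.foldl (fun acc x => if p x then acc ++ [x] else acc) acc
    = acc ++ l.filter (fun x => decide (p x)) := by
  have h := PySem.List.foldl_append_if (p := fun x => decide (p x)) (f := fun x : Int => x) l acc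
  simp only [decide_eq_true_eq, List.map_id'] at h
  exact h

theorem pv_A_eq (mapping : List (Int × Int)) :
    return_one_to_one mapping
    = (PySem.Dict.ofList (mapping.filter
        (fun p => (mapping.map (fun q => q.2)).count p.2 == 1))).items := by
  unfold return_one_to_one
  show (PySem.Dict.ofList
      ((PySem.List.sorted
        ((PySem.List.pyRange 0 (((mapping.map (fun p => p.2)).length : Int) ) 1).foldl
          (fun temp i =>
            if PySem.List.count (mapping.map (fun p => p.2))
                (PySem.List.pyGetD (mapping.map (fun p => p.2)) i 0) ≠ 1
            then temp ++ [i] else temp) [])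
        (fun x => x) true).foldl
        (fun ml index =>
          match PySem.List.pop? ml index with
          | some r => r.2
          | none => ml) mapping)).items = _
  have htemp : (PySem.List.pyRange 0 (((mapping.map (fun p => p.2)).length : Int)) 1).foldl
        (fun temp i =>
          if PySem.List.count (mapping.map (fun p => p.2))
              (PySem.List.pyGetD (mapping.map (fun p => p.2)) i 0) ≠ 1
          then temp ++ [i] else temp) []
      = ((List.range mapping.length).filter
          (fun k => !((mapping.map (fun q => q.2)).count (mapping.getD k ((0:Int),(0:Int))).2 == 1))).map
          (Nat.cast : Nat → Int) := by
    rw [pv_foldl_append_ite]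
    rw [List.nil_append]
    rw [PySem.List.pyRange_one]
    rw [List.filter_map]
    have hn : ((((mapping.map (fun p => p.2)).length : Int)) - 0).toNat = mapping.length := by
      simp
    rw [hn]
    simp only [zero_add]
    refine congrArg (List.map (Nat.cast : Nat → Int)) (List.filter_congr ?_)
    intro k hk
    have hk' : k < mapping.length := List.mem_range.mp hk
    simp only [Function.comp_apply]
    rw [PySem.List.pyGetD_natCast]
    rw [show (0 : Int) = ((0,0) : Int × Int).2 from rfl, List.getD_map]
    rw [PySem.List.count_eq]
    simp only [decide_not]
    rfl
  rw [htemp]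
  have hsort : PySem.List.sorted
      (((List.range mapping.length).filter
          (fun k => !((mapping.map (fun q => q.2)).count (mapping.getD k ((0:Int),(0:Int))).2 == 1))).map
          (Nat.cast : Nat → Int)) (fun x => x) true
      = (((List.range mapping.length).filter
          (fun k => !((mapping.map (fun q => q.2)).count (mapping.getD k ((0:Int),(0:Int))).2 == 1))).map
          (Nat.cast : Nat → Int)).reverse := by
    refine PySem.List.sorted_rev_eq_of_perm_of_pairwise_gt _ _ _ (List.reverse_perm _) ?_
    rw [List.pairwise_reverse]
    have hr : ((List.range mapping.length).filter
        (fun k => !((mapping.map (fun q => q.2)).count (mapping.getD k ((0:Int),(0:Int))).2 == 1))).Pairwise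
        (fun a b : Nat => a < b) :=
      List.Pairwise.sublist List.filter_sublist List.pairwise_lt_range
    exact hr.map _ (fun a b (h : a < b) => by exact_mod_cast h)
  rw [hsort]
  have hdel := pv_del_foldl
    (fun p => (mapping.map (fun q => q.2)).count p.2 == 1) mapping
  rw [hdel]

theorem pv_ofList_cons (x : Int) (xs : List Int) :
    PySem.Set.ofList (x :: xs) = x :: (PySem.Set.ofList xs).filter (fun y => !(y == x)) := by
  have h := PySem.Set.ofList_append [x] xs
  rw [List.singleton_append] at h
  rw [h, PySem.Set.update_eq_append_filter]
  have h1 : PySem.Set.ofList [x] = [x] := rfl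
  rw [h1]
  refine congrArg (x :: ·) (List.filter_congr ?_)
  intro y _
  simp [PySem.Set.contains]
  rfl

theorem pv_main (l : List (Int × Int)) (P : Int → Bool) (f : Int → Int × Int)
    (h1 : ∀ p ∈ l, P p.2 → f p.2 = p)
    (h2 : ((l.filter (fun p => P p.2)).map (fun p => p.2)).Nodup) :
    ((PySem.Set.ofList (l.map (fun p => p.2))).filter P).map f
    = l.filter (fun p => P p.2) := by
  induction l with
  | nil => rfl
  | cons p t ih =>
    have h1t : ∀ q ∈ t, P q.2 → f q.2 = q := fun q hq hPq => h1 q (List.mem_cons_of_mem p hq) hPq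
    rw [List.map_cons, pv_ofList_cons]
    by_cases hPp : P p.2
    · have hfc : List.filter (fun q => P q.2) (p :: t) = p :: List.filter (fun q => P q.2) t :=
        List.filter_cons_of_pos hPp
      rw [hfc] at h2 ⊢
      simp only [List.map_cons, List.nodup_cons] at h2
      have hnot : p.2 ∉ t.map (fun q => q.2) := by
        intro hmem
        obtain ⟨q, hq, hq2⟩ := List.mem_map.mp hmem
        exact h2.1 (List.mem_map.mpr ⟨q, List.mem_filter.mpr ⟨hq, by rw [hq2]; exact hPp⟩, hq2⟩)
      have hdrop : (PySem.Set.ofList (t.map (fun q => q.2))).filter (fun y => !(y == p.2))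
          = PySem.Set.ofList (t.map (fun q => q.2)) := by
        apply List.filter_eq_self.mpr
        intro y hy
        have : y ∈ t.map (fun q => q.2) := (PySem.Set.mem_ofList _ _).mp hy
        have hne : y ≠ p.2 := fun hyx => hnot (hyx ▸ this)
        simpa using hne
      rw [List.filter_cons_of_pos hPp, hdrop, List.map_cons, h1 p List.mem_cons_self hPp]
      exact congrArg (p :: ·) (ih h1t h2.2)
    · have hfc : List.filter (fun q => P q.2) (p :: t) = List.filter (fun q => P q.2) t :=
        List.filter_cons_of_neg (by simpa using hPp)
      rw [hfc] at h2 ⊢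
      have hPpb : P p.2 = false := by simpa using hPp
      rw [List.filter_cons_of_neg (by simpa using hPp)]
      have hdrop : ((PySem.Set.ofList (t.map (fun q => q.2))).filter (fun y => !(y == p.2))).filter P
          = (PySem.Set.ofList (t.map (fun q => q.2))).filter P := by
        rw [List.filter_comm]
        apply List.filter_eq_self.mpr
        intro y hy
        have hPy : P y = true := (List.mem_filter.mp hy).2
        have : y ≠ p.2 := by intro hyx; rw [hyx, hPpb] at hPy; exact Bool.noConfusion hPy
        simpa using this
      rw [hdrop]
      exact ih h1t h2

theorem pv_count_len (mapping : List (Int × Int)) (v : Int) :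
    ((mapping.filter (fun p => p.2 == v)).map (fun p => p.1)).length
    = List.count v (mapping.map (fun q => q.2)) := by
  rw [List.length_map, List.count_eq_countP, List.countP_map, List.countP_eq_length_filter]
  rfl

theorem pv_unique_pair (mapping : List (Int × Int)) (p : Int × Int) (hp : p ∈ mapping)
    (hc : List.count p.2 (mapping.map (fun q => q.2)) = 1) :
    mapping.filter (fun q => q.2 == p.2) = [p] := by
  have hlen : (mapping.filter (fun q => q.2 == p.2)).length = 1 := by
    have := pv_count_len mapping p.2
    rw [List.length_map] at this
    rw [this, hc]
  obtain ⟨a, ha⟩ := List.length_eq_one_iff.mp hlen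
  have hpm : p ∈ mapping.filter (fun q => q.2 == p.2) := List.mem_filter.mpr ⟨hp, by simp⟩
  rw [ha] at hpm
  simp only [List.mem_singleton] at hpm
  rw [ha, hpm]

theorem pv_nodup (mapping : List (Int × Int)) :
    ((mapping.filter (fun p => List.count p.2 (mapping.map (fun q => q.2)) == 1)).map
      (fun p => p.2)).Nodup := by
  rw [List.nodup_iff_count_le_one]
  intro a
  rw [List.count_eq_countP, List.countP_map]
  by_cases h : List.count a (mapping.map (fun q => q.2)) = 1
  · have hle : List.countP ((fun x => x == a) ∘ fun p => p.2)
        (mapping.filter (fun p => List.count p.2 (mapping.map (fun q => q.2)) == 1))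
        ≤ List.countP ((fun x => x == a) ∘ fun p => p.2) mapping :=
      List.Sublist.countP_le List.filter_sublist
    have : List.countP ((fun x => x == a) ∘ fun p => p.2) mapping
        = List.count a (mapping.map (fun q => q.2)) := by
      rw [List.count_eq_countP, List.countP_map]
    omega
  · have : List.countP ((fun x => x == a) ∘ fun p => p.2)
        (mapping.filter (fun p => List.count p.2 (mapping.map (fun q => q.2)) == 1)) = 0 := by
      apply List.countP_eq_zero.mpr
      intro q hq
      have hq' := List.mem_filter.mp hq
      simp only [Function.comp_apply, beq_iff_eq]
      intro hqa
      apply h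
      rw [← hqa]
      exact beq_iff_eq.mp hq'.2
    omega

theorem pv_B_shape (mapping : List (Int × Int)) :
    return_one_to_one_alt mapping
    = (PySem.Dict.ofList (((PySem.Set.ofList (mapping.map (fun q => q.2))).filter
          (fun v => decide ((((mapping.filter (fun p => p.2 == v)).map (fun p => p.1)).length = 1)))).map
        (fun v => (PySem.List.pyGetD ((mapping.filter (fun p => p.2 == v)).map (fun p => p.1)) 0 0, v)))).items := by
  unfold return_one_to_one_alt
  show (List.foldl (fun out p => if p.2.length = 1 then out.insert (PySem.List.pyGetD p.2 0 0) p.1 else out)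
      PySem.Dict.empty
      (List.foldl (fun g p => g.modify p.2 [] fun ks => ks ++ [p.1]) PySem.Dict.empty mapping).items).items = _
  have hswap : mapping.foldl (fun g p => g.modify p.2 [] (fun ks => ks ++ [p.1])) PySem.Dict.empty
      = (mapping.map Prod.swap).foldl (fun d q => d.modify q.1 [] (fun x => x ++ [q.2])) PySem.Dict.empty := by
    rw [List.foldl_map]
    rfl
  have hkeys : (mapping.foldl (fun g p => g.modify p.2 [] (fun ks => ks ++ [p.1])) PySem.Dict.empty).keys
      = PySem.Set.ofList (mapping.map (fun q => q.2)) := by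
    rw [PySem.Dict.keys_foldl_modify_key mapping (fun p => p.2) [] (fun _ p ks => ks ++ [p.1]) PySem.Dict.empty]
    rw [show (PySem.Dict.empty : PySem.Dict Int (List Int)).keys = [] from rfl]
    exact PySem.Set.update_nil_left _
  have hnodup : (mapping.foldl (fun g p => g.modify p.2 [] (fun ks => ks ++ [p.1])) PySem.Dict.empty).keys.Nodup :=
    PySem.Dict.nodup_keys_foldl_modify_key mapping (fun p => p.2) [] (fun _ p ks => ks ++ [p.1]) PySem.Dict.empty
      PySem.Dict.nodup_keys_empty
  have hgetD : ∀ c, (mapping.foldl (fun g p => g.modify p.2 [] (fun ks => ks ++ [p.1])) PySem.Dict.empty).getD c []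
      = (mapping.filter (fun p => p.2 == c)).map (fun p => p.1) := by
    intro c
    rw [hswap, PySem.Dict.getD_foldl_modify_append (mapping.map Prod.swap) PySem.Dict.empty c]
    simp [List.filter_map, List.map_map, Function.comp_def, Prod.swap]
  have hitems : (mapping.foldl (fun g p => g.modify p.2 [] (fun ks => ks ++ [p.1])) PySem.Dict.empty).items
      = (PySem.Set.ofList (mapping.map (fun q => q.2))).map
          (fun v => (v, (mapping.filter (fun p => p.2 == v)).map (fun p => p.1))) := by
    rw [PySem.Dict.items_eq_map_keys _ hnodup [], hkeys]
    exact List.map_congr_left (fun v _ => by rw [hgetD v])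
  rw [hitems]
  have hof : ∀ L : List (Int × Int), PySem.Dict.ofList L
      = L.foldl (fun d p => d.insert p.1 p.2) PySem.Dict.empty := fun L => rfl
  rw [hof, List.foldl_map, List.foldl_map]
  have hfil := (List.foldl_filter
    (p := fun v : Int => decide ((((mapping.filter (fun p => p.2 == v)).map (fun p => p.1)).length = 1)))
    (f := fun (out : PySem.Dict Int Int) (v : Int) =>
      out.insert (PySem.List.pyGetD ((mapping.filter (fun p => p.2 == v)).map (fun p => p.1)) 0 0) v)
    (l := PySem.Set.ofList (mapping.map (fun q => q.2))) (init := PySem.Dict.empty))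
  simp only [decide_eq_true_eq] at hfil
  rw [hfil]

theorem pv_B_eq (mapping : List (Int × Int)) :
    return_one_to_one_alt mapping
    = (PySem.Dict.ofList (mapping.filter
        (fun p => (mapping.map (fun q => q.2)).count p.2 == 1))).items := by
  rw [pv_B_shape]
  refine congrArg (fun L => (PySem.Dict.ofList L).items) ?_
  have hfc : (PySem.Set.ofList (mapping.map (fun q => q.2))).filter
        (fun v => decide ((((mapping.filter (fun p => p.2 == v)).map (fun p => p.1)).length = 1)))
      = (PySem.Set.ofList (mapping.map (fun q => q.2))).filter
        (fun v => List.count v (mapping.map (fun q => q.2)) == 1) := by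
    refine List.filter_congr ?_
    intro v _
    rw [pv_count_len]
    rfl
  rw [hfc]
  refine pv_main mapping (fun v => List.count v (mapping.map (fun q => q.2)) == 1)
    (fun v => (PySem.List.pyGetD ((mapping.filter (fun p => p.2 == v)).map (fun p => p.1)) 0 0, v))
    ?_ (pv_nodup mapping)
  intro p hp hP
  have hc : List.count p.2 (mapping.map (fun q => q.2)) = 1 := beq_iff_eq.mp hP
  have := pv_unique_pair mapping p hp hc
  simp only [this, List.map_cons, List.map_nil]
  rw [PySem.List.pyGetD_ofNat']
  rfl

-- ===== VERDICT (by name: the statement is the Claim_ definition above) =====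
theorem return_one_to_one_spec : Claim_equal_return_one_to_one := by
  intro mapping _
  unfold Spec_return_one_to_one
  rw [pv_A_eq, pv_B_eq]
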